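-- pv_equiv track=rewrite | github.com/tomaxskr/prelegal | backend/main.py | order_collected_field_keys
-- ===== SOURCE A (Python) =====
-- REQUIRED_FIELDS_BY_DOCUMENT = {
--     "Cloud Service Agreement (CSA)": [
--         "providerCompanyName",
--         "customerCompanyName",
--         "effectiveDate",
--         "servicesDescription",
--         "fees",
--         "term",
--         "governingLaw",
--     ],
--     "Mutual NDA": [
--         "party1Name",
--         "party2Name",
--         "purpose",
--         "effectiveDate",
--         "term",
--         "governingLaw",
--     ],
--     "Business Associate Agreement (BAA)": [
--         "coveredEntityName",
--         "businessAssociateName",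
--         "purpose",
--         "effectiveDate",
--         "governingLaw",
--     ],
-- }
--
-- GENERIC_REQUIRED_FIELDS = [
--     "party1Name",
--     "party2Name",
--     "purpose",
--     "effectiveDate",
--     "term",
--     "governingLaw",
-- ]
--
-- def order_collected_field_keys(selected_document: str, collected_fields: dict[str, str]) -> list[str]:
--     required_fields = get_required_fields(selected_document)
--     required_in_payload = [
--         field_name for field_name in required_fields if field_name in collected_fields
--     ]
--     other_fields = sorted(
--         [field_name for field_name in collected_fields if field_name not in required_in_payload]
--     )
--     return required_in_payload + other_fields
--
-- def get_required_fields(selected_document: str | None) -> list[str]: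
--     if not selected_document:
--         return []
--     return REQUIRED_FIELDS_BY_DOCUMENT.get(selected_document, GENERIC_REQUIRED_FIELDS)
-- ===== SOURCE B (Python) =====
-- REQUIRED_FIELDS_BY_DOCUMENT = {
--     "Cloud Service Agreement (CSA)": [
--         "providerCompanyName",
--         "customerCompanyName",
--         "effectiveDate",
--         "servicesDescription",
--         "fees",
--         "term",
--         "governingLaw",
--     ],
--     "Mutual NDA": [
--         "party1Name",
--         "party2Name",
--         "purpose",
--         "effectiveDate",
--         "term",
--         "governingLaw",
--     ],
--     "Business Associate Agreement (BAA)": [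
--         "coveredEntityName",
--         "businessAssociateName",
--         "purpose",
--         "effectiveDate",
--         "governingLaw",
--     ],
-- }
--
-- GENERIC_REQUIRED_FIELDS = [
--     "party1Name",
--     "party2Name",
--     "purpose",
--     "effectiveDate",
--     "term",
--     "governingLaw",
-- ]
--
--
-- def get_required_fields(selected_document):
--     if not selected_document:
--         return []
--     return REQUIRED_FIELDS_BY_DOCUMENT.get(selected_document, GENERIC_REQUIRED_FIELDS)
--
--
-- def order_collected_field_keys(selected_document: str, collected_fields: dict[str, str]) -> list[str]:
--     required_fields = get_required_fields(selected_document)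
--     n = len(required_fields)
--     rank = {name: i for i, name in enumerate(required_fields)}
--     return sorted(collected_fields, key=lambda k: (rank.get(k, n), k))
-- ===== Notes on version B (the rewrite author's own statement) =====
-- stated objective: idiomatic
-- what changed: A partitions twice (filter required-present, then sort the filtered remainder) and concatenates; B builds a rank index from the canonical required-field list once and returns a single sorted() of all payload keys under the lexicographic key (rank-or-n, key).
import Mathlib
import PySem

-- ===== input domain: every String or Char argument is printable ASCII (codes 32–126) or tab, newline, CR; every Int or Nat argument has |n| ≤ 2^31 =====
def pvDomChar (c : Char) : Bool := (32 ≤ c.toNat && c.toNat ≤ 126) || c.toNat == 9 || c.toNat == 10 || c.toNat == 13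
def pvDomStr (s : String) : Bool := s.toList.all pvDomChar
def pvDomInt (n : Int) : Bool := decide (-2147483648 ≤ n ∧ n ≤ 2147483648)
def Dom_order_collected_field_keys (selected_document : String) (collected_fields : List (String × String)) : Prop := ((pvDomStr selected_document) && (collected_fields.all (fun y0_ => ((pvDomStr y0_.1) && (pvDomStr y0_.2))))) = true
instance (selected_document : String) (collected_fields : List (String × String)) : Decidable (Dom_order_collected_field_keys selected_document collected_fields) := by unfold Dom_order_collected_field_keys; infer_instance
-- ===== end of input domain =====

-- B replaces A's two filtered passes plus concatenation by one keyed sort of the key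
-- list under the lexicographic key (rank-or-n, key); objective: idiomatic/alternative.

-- ===== PORT A =====
-- module constant REQUIRED_FIELDS_BY_DOCUMENT
def pvReqByDoc : PySem.Dict String (List String) :=
  PySem.Dict.ofList [
    ("Cloud Service Agreement (CSA)",
      ["providerCompanyName", "customerCompanyName", "effectiveDate",
       "servicesDescription", "fees", "term", "governingLaw"]),
    ("Mutual NDA",
      ["party1Name", "party2Name", "purpose", "effectiveDate", "term", "governingLaw"]),
    ("Business Associate Agreement (BAA)",
      ["coveredEntityName", "businessAssociateName", "purpose", "effectiveDate", "governingLaw"])]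

-- module constant GENERIC_REQUIRED_FIELDS
def pvGenericRequired : List String :=
  ["party1Name", "party2Name", "purpose", "effectiveDate", "term", "governingLaw"]

-- helper get_required_fields (shared by A and B, as in the Python module)
def get_required_fields (selected_document : String) : List String :=
  if selected_document = "" then []
  else pvReqByDoc.getD selected_document pvGenericRequired

def order_collected_field_keys (selected_document : String) (collected_fields : List (String × String)) : List String :=
  let required_fields := get_required_fields selected_document
  let required_in_payload :=
    required_fields.filter (fun f => (collected_fields.map Prod.fst).contains f)
  let other_fields :=
    PySem.List.sorted
      ((collected_fields.map Prod.fst).filter (fun k => !required_in_payload.contains k))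
      (fun k => k)
  required_in_payload ++ other_fields

-- ===== PORT B =====
def order_collected_field_keys_alt (selected_document : String) (collected_fields : List (String × String)) : List String :=
  let required_fields := get_required_fields selected_document
  let n : Int := required_fields.length
  let rank : PySem.Dict String Int :=
    (PySem.List.enumerate required_fields).foldl
      (fun d p => d.insert p.2 p.1) PySem.Dict.empty
  PySem.List.sorted2 (collected_fields.map Prod.fst) (fun k => rank.getD k n) (fun k => k)

-- ===== PRECONDITION & SPEC =====
-- Pre_ excludes association lists with duplicate keys: such inputs cannot arise from the
-- Python argument, which is a dict (its keys are unique by construction).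
def Pre_order_collected_field_keys (selected_document : String) (collected_fields : List (String × String)) : Prop :=
  (collected_fields.map Prod.fst).Nodup
instance (selected_document : String) (collected_fields : List (String × String)) : Decidable (Pre_order_collected_field_keys selected_document collected_fields) := by unfold Pre_order_collected_field_keys; infer_instance

def pvWitness_order_collected_field_keys : String × (List (String × String)) :=
  ("Mutual NDA", [("zeta", "1"), ("purpose", "2"), ("party1Name", "3"), ("alpha", "4")])

def Spec_order_collected_field_keys (selected_document : String) (collected_fields : List (String × String)) (out : List String) : Prop := out = order_collected_field_keys_alt selected_document collected_fields
instance (selected_document : String) (collected_fields : List (String × String)) (out : List String) : Decidable (Spec_order_collected_field_keys selected_document collected_fields out) := by unfold Spec_order_collected_field_keys; infer_instance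

-- ===== CLAIM (what is proved, stated in full; the proofs are below) =====
def Claim_equal_order_collected_field_keys : Prop := ∀ (selected_document : String) (collected_fields : List (String × String)), Dom_order_collected_field_keys selected_document collected_fields → Pre_order_collected_field_keys selected_document collected_fields → Spec_order_collected_field_keys selected_document collected_fields (order_collected_field_keys selected_document collected_fields)

-- ===== LEMMAS AND PROOFS =====

-- sorted2 (a Python tuple key) is sorted under the lexicographic order on the pair.
theorem pv_sorted2_eq_sorted_toLex {α : Type} (xs : List α) (k1 : α → Int) (k2 : α → String) :
    PySem.List.sorted2 xs k1 k2 = PySem.List.sorted xs (fun x => toLex (k1 x, k2 x)) := by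
  have hfn : (fun a b => decide (k1 a < k1 b) || (!decide (k1 b < k1 a) && decide (k2 a < k2 b)))
      = (fun a b => decide (toLex (k1 a, k2 a) < toLex (k1 b, k2 b))) := by
    funext a b
    rcases lt_trichotomy (k1 a) (k1 b) with h | h | h
    · simp [Prod.Lex.lt_iff, h]
    · simp [Prod.Lex.lt_iff, h]
    · simp [Prod.Lex.lt_iff, h, asymm h, h.ne']
  unfold PySem.List.sorted2 PySem.List.sorted
  show xs.foldl (fun acc x => PySem.List.insertBy
      (fun a b => decide (k1 a < k1 b) || (!decide (k1 b < k1 a) && decide (k2 a < k2 b))) x acc) []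
    = xs.foldl (fun acc x => PySem.List.insertBy
      (fun a b => decide (toLex (k1 a, k2 a) < toLex (k1 b, k2 b))) x acc) []
  rw [hfn]

-- first-match lookup in the reversed enumeration is the first index of the key
theorem pv_get?_rankDict (req : List String) (s : Int) (k : String) :
    (PySem.Dict.mk ((PySem.List.enumerate req s).map (fun p => (p.2, p.1)))).get? k
      = if req.contains k then some (s + (req.idxOf k : Int)) else none := by
  induction req generalizing s with
  | nil => simp [PySem.List.enumerate, PySem.Dict.get?]
  | cons x xs ih =>
    rw [PySem.List.enumerate_cons]
    by_cases hx : x = k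
    · subst hx
      simp [PySem.Dict.get?_mk_cons, List.idxOf_cons_self]
    · have hxk : (x == k) = false := by simp [hx]
      have hkxb : (k == x) = false := beq_eq_false_iff_ne.mpr (fun h => hx h.symm)
      simp only [List.map_cons, PySem.Dict.get?_mk_cons, hxk, Bool.false_eq_true, if_false,
        ih (s + 1), List.contains_cons, hkxb, Bool.false_or, List.idxOf_cons, cond_false]
      by_cases hc : xs.contains k = true
      · rw [if_pos hc, if_pos hc]
        congr 1
        push_cast
        omega
      · rw [if_neg hc, if_neg hc]

theorem pv_rank_getD (req : List String) (hreq : req.Nodup) (k : String) (n : Int) :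
    ((PySem.List.enumerate req).foldl (fun d p => d.insert p.2 p.1)
        (PySem.Dict.empty : PySem.Dict String Int)).getD k n
      = if req.contains k then (req.idxOf k : Int) else n := by
  have hitems :
      ((PySem.List.enumerate req).foldl (fun d p => d.insert p.2 p.1)
          (PySem.Dict.empty : PySem.Dict String Int)).items
        = (PySem.List.enumerate req).map (fun p => (p.2, p.1)) := by
    have := PySem.Dict.items_foldl_insert_fresh (PySem.List.enumerate req)
      (fun p => p.2) (fun p => p.1) (PySem.Dict.empty : PySem.Dict String Int)
      (by intro a _; rfl)
      (by rw [PySem.List.map_snd_enumerate]; exact hreq)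
    simpa using this
  have hd :
      ((PySem.List.enumerate req).foldl (fun d p => d.insert p.2 p.1)
          (PySem.Dict.empty : PySem.Dict String Int))
        = PySem.Dict.mk ((PySem.List.enumerate req).map (fun p => (p.2, p.1))) := by
    apply PySem.Dict.ext; simpa using hitems
  rw [PySem.Dict.getD_eq_get?_getD, hd, pv_get?_rankDict req 0 k]
  by_cases hm : k ∈ req <;> simp [hm]

-- the required-fields list is always duplicate-free
theorem pv_req_nodup (sd : String) : (get_required_fields sd).Nodup := by
  unfold get_required_fields
  by_cases h0 : sd = ""
  · simp [h0]
  · rw [if_neg h0]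
    by_cases h1 : sd = "Cloud Service Agreement (CSA)"
    · subst h1; decide
    · by_cases h2 : sd = "Mutual NDA"
      · subst h2; decide
      · by_cases h3 : sd = "Business Associate Agreement (BAA)"
        · subst h3; decide
        · have hmk : pvReqByDoc = PySem.Dict.mk [
              ("Cloud Service Agreement (CSA)",
                ["providerCompanyName", "customerCompanyName", "effectiveDate",
                 "servicesDescription", "fees", "term", "governingLaw"]),
              ("Mutual NDA",
                ["party1Name", "party2Name", "purpose", "effectiveDate", "term", "governingLaw"]),
              ("Business Associate Agreement (BAA)",
                ["coveredEntityName", "businessAssociateName", "purpose", "effectiveDate",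
                 "governingLaw"])] := by decide
          have hno : pvReqByDoc.contains sd = false := by
            rw [hmk]
            simp [PySem.Dict.contains_mk, Ne.symm h1, Ne.symm h2, Ne.symm h3]
          rw [PySem.Dict.getD_of_not_contains pvReqByDoc pvGenericRequired hno]
          decide

-- a duplicate-free list is strictly increasing under idxOf
theorem pv_pairwise_idxOf (l : List String) (h : l.Nodup) :
    l.Pairwise (fun a b => l.idxOf a < l.idxOf b) := by
  rw [List.pairwise_iff_getElem]
  intro i j hi hj hij
  rw [List.Nodup.idxOf_getElem h i hi, List.Nodup.idxOf_getElem h j hj]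
  exact hij

-- core equivalence, stated over an arbitrary duplicate-free required list and key list
theorem pv_core (req keys : List String) (hreq : req.Nodup) (hkeys : keys.Nodup) :
    PySem.List.sorted2 keys
        (fun k => if req.contains k then (req.idxOf k : Int) else (req.length : Int))
        (fun k => k)
      = req.filter (fun f => keys.contains f)
        ++ PySem.List.sorted
            (keys.filter (fun k => !(req.filter (fun f => keys.contains f)).contains k))
            (fun k => k) := by
  set rnk : String → Int :=
    fun k => if req.contains k then (req.idxOf k : Int) else (req.length : Int) with hrnk
  set rip := req.filter (fun f => keys.contains f) with hrip
  set others := keys.filter (fun k => !rip.contains k) with hothers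
  set srt := PySem.List.sorted others (fun k => k) with hsrt
  rw [pv_sorted2_eq_sorted_toLex]
  apply PySem.List.sorted_eq_of_perm_of_pairwise_lt
  · -- permutation
    have h1 : rip.Perm (keys.filter (fun k => rip.contains k)) := by
      rw [List.perm_ext_iff_of_nodup (hreq.filter _) (hkeys.filter _)]
      intro a
      simp only [hrip, List.mem_filter]
      simp only [List.contains_iff_mem, List.mem_filter]
      tauto
    have h2 : srt.Perm others := PySem.List.sorted_perm others (fun k => k) false
    exact ((h1.append h2).trans
      (List.filter_append_perm (fun k => rip.contains k) keys))
  · -- strictly increasing under the lexicographic key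
    have hmem_rip : ∀ a ∈ rip, a ∈ req ∧ a ∈ keys := by
      intro a ha
      rw [hrip, List.mem_filter, List.contains_iff_mem] at ha
      exact ha
    have hmem_srt : ∀ a ∈ srt, a ∈ keys ∧ a ∉ req := by
      intro a ha
      have ha' : a ∈ others := (PySem.List.mem_sorted _ _ _ _).mp ha
      simp only [hothers, List.mem_filter] at ha'
      refine ⟨ha'.1, fun hreqmem => ?_⟩
      have : rip.contains a = true := by
        apply List.contains_iff_mem.mpr
        rw [hrip, List.mem_filter, List.contains_iff_mem]
        exact ⟨hreqmem, ha'.1⟩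
      rw [this] at ha'
      simpa using ha'.2
    rw [List.pairwise_append]
    refine ⟨?_, ?_, ?_⟩
    · -- inside rip: canonical order, first component strictly increases
      have hp : rip.Pairwise (fun a b => req.idxOf a < req.idxOf b) :=
        List.Pairwise.filter _ (pv_pairwise_idxOf req hreq)
      refine hp.imp_of_mem ?_
      intro a b ha hb hlt
      have haq := (hmem_rip a ha).1
      have hbq := (hmem_rip b hb).1
      rw [Prod.Lex.lt_iff]
      simp only [ofLex_toLex]
      left
      have h1 : req.contains a = true := List.contains_iff_mem.mpr haq
      have h2 : req.contains b = true := List.contains_iff_mem.mpr hbq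
      simp only [hrnk, h1, h2, if_true]
      exact_mod_cast hlt
    · -- inside the sorted remainder: first components equal, second strictly increases
      have hnodup : srt.Nodup :=
        ((PySem.List.sorted_perm others (fun k => k) false).nodup_iff).mpr
          (hkeys.filter _)
      have hle : srt.Pairwise (fun a b : String => a ≤ b) :=
        PySem.List.sorted_pairwise others (fun k => k)
      have hlt : srt.Pairwise (fun a b : String => a < b) :=
        (hle.and hnodup).imp (fun h => lt_of_le_of_ne h.1 h.2)
      refine hlt.imp_of_mem ?_
      intro a b ha hb hab
      have haq := hmem_srt a ha
      have hbq := hmem_srt b hb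
      rw [Prod.Lex.lt_iff]
      simp only [ofLex_toLex]
      right
      have h1 : req.contains a = false := by simp [haq.2]
      have h2 : req.contains b = false := by simp [hbq.2]
      simp only [hrnk, h1, h2, Bool.false_eq_true, if_false]
      exact ⟨by trivial, hab⟩
    · -- across: required-present keys come strictly before all others
      intro a ha b hb
      have haq := (hmem_rip a ha).1
      have hbq := hmem_srt b hb
      rw [Prod.Lex.lt_iff]
      simp only [ofLex_toLex]
      left
      have h1 : req.contains a = true := List.contains_iff_mem.mpr haq
      have h2 : req.contains b = false := by simp [hbq.2]
      simp only [hrnk, h1, h2, if_true, Bool.false_eq_true, if_false]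
      exact_mod_cast List.idxOf_lt_length_of_mem haq

-- ===== VERDICT (by name: the statement is the Claim_ definition above) =====
theorem order_collected_field_keys_spec : Claim_equal_order_collected_field_keys := by
  intro sd cf _ hpre
  unfold Spec_order_collected_field_keys order_collected_field_keys order_collected_field_keys_alt
  simp only
  have hfun : (fun k => (((PySem.List.enumerate (get_required_fields sd)).foldl
        (fun d p => d.insert p.2 p.1) (PySem.Dict.empty : PySem.Dict String Int)).getD k
        ((get_required_fields sd).length : Int)))
      = fun k => if (get_required_fields sd).contains k
          then ((get_required_fields sd).idxOf k : Int)
          else ((get_required_fields sd).length : Int) :=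
    funext fun k => pv_rank_getD _ (pv_req_nodup sd) k _
  rw [hfun]
  exact (pv_core _ _ (pv_req_nodup sd) hpre).symm
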